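-- pv_equiv track=rewrite | github.com/wideshreck/erpnext-setup-wizard | wizard/steps/env_file.py | _env_quote
-- ===== SOURCE A (Python) =====
-- def _env_quote(value: str) -> str:
--     """Quote a value for safe Docker Compose .env file inclusion.
--
--     Docker Compose only supports double-quoted values in .env files.
--     """
--     needs_quoting = set("#$\"'`\\!&|;() \t\n\r")
--     if any(c in needs_quoting for c in value):
--         escaped = (value
--                    .replace("\\", "\\\\")
--                    .replace('"', '\\"')
--                    .replace("$", "\\$")
--                    .replace("`", "\\`")
--                    .replace("\n", "\\n")
--                    .replace("\r", "\\r"))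
--         return f'"{escaped}"'
--     return value
-- ===== SOURCE B (Python) =====
-- _ESC = {'\\': '\\\\', '"': '\\"', '$': '\\$', '`': '\\`', '\n': '\\n', '\r': '\\r'}
-- _TRIGGERS = set("#$\"'`\\!&|;() \t\n\r")
--
--
-- def _env_quote(value: str) -> str:
--     """Quote a value for safe Docker Compose .env file inclusion.
--
--     Single pass: escape each character and flag whether quoting is needed.
--     """
--     needs_quoting = False
--     parts = []
--     for c in value:
--         if c in _TRIGGERS:
--             needs_quoting = True
--         parts.append(_ESC.get(c, c))
--     if needs_quoting:
--         return '"' + ''.join(parts) + '"'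
--     return value
-- ===== Notes on version B (the rewrite author's own statement) =====
-- stated objective: simpler
-- what changed: Replaced the any()-scan plus six sequential str.replace passes with a single loop over the characters that both sets the needs-quoting flag and appends each character's escape from a dict.
import Mathlib
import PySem

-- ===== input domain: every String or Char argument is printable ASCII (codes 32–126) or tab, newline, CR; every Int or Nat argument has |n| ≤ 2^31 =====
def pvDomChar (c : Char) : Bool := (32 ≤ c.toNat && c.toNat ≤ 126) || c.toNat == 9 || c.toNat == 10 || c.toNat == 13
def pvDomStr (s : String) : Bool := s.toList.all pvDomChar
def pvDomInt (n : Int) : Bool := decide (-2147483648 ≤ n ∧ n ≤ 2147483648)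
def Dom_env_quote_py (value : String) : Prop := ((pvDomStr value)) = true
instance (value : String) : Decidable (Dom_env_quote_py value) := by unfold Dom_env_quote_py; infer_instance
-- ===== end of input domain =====

-- B replaces A's any()-scan plus six sequential str.replace passes by one loop that
-- escapes each character via a table and sets a needs-quoting flag (objective: simpler).

-- ===== PORT A =====
def env_quote_py (value : String) : String :=
  let needs_quoting : PySem.Set Char := PySem.Set.ofList "#$\"'`\\!&|;() \t\n\r".toList
  if value.toList.any (fun c => PySem.Set.contains needs_quoting c) then
    let escaped :=
      PySem.Str.replace (PySem.Str.replace (PySem.Str.replace (PySem.Str.replace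
        (PySem.Str.replace (PySem.Str.replace value "\\" "\\\\") "\"" "\\\"")
        "$" "\\$") "`" "\\`") "\n" "\\n") "\r" "\\r"
    String.ofList ('"' :: escaped.toList ++ ['"'])
  else value

-- ===== PORT B =====
-- the escape table _ESC as a function (dict .get(c, c))
def pvEsc (c : Char) : List Char :=
  if c = '\\' then ['\\', '\\']
  else if c = '"' then ['\\', '"']
  else if c = '$' then ['\\', '$']
  else if c = '`' then ['\\', '`']
  else if c = '\n' then ['\\', 'n']
  else if c = '\r' then ['\\', 'r']
  else [c]

-- membership in the trigger set _TRIGGERS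
def pvTrig (c : Char) : Bool := c ∈ "#$\"'`\\!&|;() \t\n\r".toList

def env_quote_py_alt (value : String) : String :=
  let st := value.toList.foldl
    (fun st c => (st.1 || pvTrig c, st.2 ++ pvEsc c)) (false, ([] : List Char))
  if st.1 then String.ofList ('"' :: st.2 ++ ['"']) else value

-- ===== PRECONDITION & SPEC =====
def Spec_env_quote_py (value : String) (out : String) : Prop := out = env_quote_py_alt value
instance (value : String) (out : String) : Decidable (Spec_env_quote_py value out) := by unfold Spec_env_quote_py; infer_instance

-- ===== CLAIM (what is proved, stated in full; the proofs are below) =====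
def Claim_equal_env_quote_py : Prop := ∀ (value : String), Dom_env_quote_py value → Spec_env_quote_py value (env_quote_py value)

-- ===== LEMMAS AND PROOFS =====

-- replace with a single-character pattern is a flatMap
lemma replace_go_single (c : Char) (new : List Char) :
    ∀ (fuel : Nat) (l acc : List Char), l.length ≤ fuel →
      PySem.Chars.replace.go [c] new fuel l acc
        = acc.reverse ++ l.flatMap (fun x => if x = c then new else [x]) := by
  intro fuel
  induction fuel with
  | zero =>
    intro l acc h
    have : l = [] := List.eq_nil_of_length_eq_zero (Nat.le_zero.mp h)
    subst this
    simp [PySem.Chars.replace.go]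
  | succ n ih =>
    intro l acc h
    cases l with
    | nil => simp [PySem.Chars.replace.go]
    | cons c' t =>
      by_cases hc : c' = c
      · subst hc
        have hp : List.isPrefixOf [c'] (c' :: t) = true := by
          simp [List.isPrefixOf]
        simp only [PySem.Chars.replace.go, hp, if_pos, List.length_cons, List.length_nil,
          List.drop_succ_cons, List.drop_zero]
        rw [ih t (new.reverse ++ acc) (by simpa using Nat.lt_succ_iff.mp (by simpa using h))]
        simp
      · have hp : List.isPrefixOf [c] (c' :: t) = false := by
          simp [List.isPrefixOf]
          exact fun hcc => (hc hcc.symm).elim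
        simp only [PySem.Chars.replace.go, hp, Bool.false_eq_true, if_false]
        rw [ih t (c' :: acc) (by simpa using Nat.lt_succ_iff.mp (by simpa using h))]
        simp [hc]

lemma replace_single (s : List Char) (c : Char) (new : List Char) :
    PySem.Chars.replace s [c] new = s.flatMap (fun x => if x = c then new else [x]) := by
  rw [PySem.Chars.replace]
  simp only [List.isEmpty_cons, Bool.false_eq_true, if_false]
  exact replace_go_single c new s.length s [] (le_refl _)

-- the B fold computes (any trigger, flatMap of escapes)
lemma fold_spec (l : List Char) : ∀ (b : Bool) (acc : List Char),
    l.foldl (fun st c => (st.1 || pvTrig c, st.2 ++ pvEsc c)) (b, acc)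
      = (b || l.any pvTrig, acc ++ l.flatMap pvEsc) := by
  induction l with
  | nil => intro b acc; simp
  | cons c t ih =>
    intro b acc
    simp only [List.foldl_cons, ih, List.any_cons, List.flatMap_cons]
    simp [Bool.or_assoc]

-- the six replace passes compose to the per-character escape
lemma comp_eq_esc (c : Char) :
    ((((((if c = '\\' then ['\\','\\'] else [c]).flatMap
        (fun x => if x = '"' then ['\\','"'] else [x])).flatMap
        (fun x => if x = '$' then ['\\','$'] else [x])).flatMap
        (fun x => if x = '`' then ['\\','`'] else [x])).flatMap
        (fun x => if x = '\n' then ['\\','n'] else [x])).flatMap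
        (fun x => if x = '\r' then ['\\','r'] else [x]))
      = pvEsc c := by
  by_cases h1 : c = '\\'; · subst h1; decide
  by_cases h2 : c = '"'; · subst h2; decide
  by_cases h3 : c = '$'; · subst h3; decide
  by_cases h4 : c = '`'; · subst h4; decide
  by_cases h5 : c = '\n'; · subst h5; decide
  by_cases h6 : c = '\r'; · subst h6; decide
  simp [pvEsc, h1, h2, h3, h4, h5, h6]

-- A's trigger test agrees with B's
lemma contains_eq_trig (c : Char) :
    PySem.Set.contains (PySem.Set.ofList "#$\"'`\\!&|;() \t\n\r".toList) c = pvTrig c := by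
  have h : PySem.Set.ofList "#$\"'`\\!&|;() \t\n\r".toList = "#$\"'`\\!&|;() \t\n\r".toList := by decide
  rw [h]
  unfold PySem.Set.contains pvTrig
  simp

-- the whole replace chain is the flatMap of pvEsc
lemma escaped_eq (value : String) :
    (PySem.Str.replace (PySem.Str.replace (PySem.Str.replace (PySem.Str.replace
      (PySem.Str.replace (PySem.Str.replace value "\\" "\\\\") "\"" "\\\"")
      "$" "\\$") "`" "\\`") "\n" "\\n") "\r" "\\r").toList
      = value.toList.flatMap pvEsc := by
  simp only [PySem.Str.toList_replace]
  have e1 : "\\".toList = ['\\'] := rfl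
  have e2 : "\\\\".toList = ['\\','\\'] := rfl
  have e3 : "\"".toList = ['"'] := rfl
  have e4 : "\\\"".toList = ['\\','"'] := rfl
  have e5 : "$".toList = ['$'] := rfl
  have e6 : "\\$".toList = ['\\','$'] := rfl
  have e7 : "`".toList = ['`'] := rfl
  have e8 : "\\`".toList = ['\\','`'] := rfl
  have e9 : "\n".toList = ['\n'] := rfl
  have e10 : "\\n".toList = ['\\','n'] := rfl
  have e11 : "\r".toList = ['\r'] := rfl
  have e12 : "\\r".toList = ['\\','r'] := rfl
  rw [e1, e2, e3, e4, e5, e6, e7, e8, e9, e10, e11, e12]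
  rw [replace_single, replace_single, replace_single, replace_single, replace_single,
    replace_single]
  simp only [List.flatMap_assoc]
  apply List.flatMap_congr
  intro c _
  rw [← comp_eq_esc c]
  simp only [List.flatMap_assoc]

-- ===== VERDICT (by name: the statement is the Claim_ definition above) =====
theorem env_quote_py_spec : Claim_equal_env_quote_py := by
  intro value _
  unfold Spec_env_quote_py env_quote_py env_quote_py_alt
  simp only [fold_spec, Bool.false_or, List.nil_append]
  simp only [contains_eq_trig]
  by_cases h : value.toList.any pvTrig = true
  · simp only [h, if_true, escaped_eq]
  · simp only [h, if_false, Bool.false_eq_true]
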